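-- pv_equiv track=rewrite | github.com/Jubo-Xu/magic-state-cultivation | algorithms/prior_gap_estimation.py | _int_to_flipped_bits
-- ===== SOURCE A (Python) =====
-- def _int_to_flipped_bits(mask: int) -> list[int]:
--     """Return indices of set bits in *mask*, LSB first."""
--     bits: list[int] = []
--     i = 0
--     while mask:
--         if mask & 1:
--             bits.append(i)
--         mask >>= 1
--         i += 1
--     return bits
-- ===== SOURCE B (Python) =====
-- def _int_to_flipped_bits(mask: int) -> list[int]:
--     """Return indices of set bits in *mask*, LSB first."""
--     return [i for i, c in enumerate(bin(mask)[:1:-1]) if c == '1']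
-- ===== Notes on version B (the rewrite author's own statement) =====
-- stated objective: idiomatic
-- what changed: Replaces A's explicit shift-and-test while loop with a one-line comprehension that enumerates the reversed binary string bin(mask)[:1:-1] and collects the positions of '1' characters.
-- outside the precondition, e.g. on _int_to_flipped_bits(-5): A does not finish within the time limit, B returns [0, 2]
import Mathlib
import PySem

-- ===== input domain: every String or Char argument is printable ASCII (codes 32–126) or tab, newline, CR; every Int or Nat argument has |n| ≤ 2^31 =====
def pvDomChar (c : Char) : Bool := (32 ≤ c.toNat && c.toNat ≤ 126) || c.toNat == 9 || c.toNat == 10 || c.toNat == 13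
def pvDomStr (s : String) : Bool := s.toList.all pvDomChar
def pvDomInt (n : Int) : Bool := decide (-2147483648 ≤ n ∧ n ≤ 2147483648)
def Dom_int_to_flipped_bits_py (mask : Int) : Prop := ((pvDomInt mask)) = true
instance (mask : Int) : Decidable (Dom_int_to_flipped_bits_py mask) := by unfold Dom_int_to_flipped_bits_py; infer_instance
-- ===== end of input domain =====

-- B re-implements the bit-index scan as a comprehension over the reversed binary string
-- (bin(mask)[:1:-1]) instead of A's shift-and-test loop; objective: idiomatic. Return value only.

-- ===== PORT A =====
-- A's while loop: on mask ≥ 0 (= Pre_), `mask & 1` is `mask % 2` and `mask >>= 1` is `mask / 2`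
-- (exact there); the `mask ≤ 0` guard only makes the recursion total — Python diverges for
-- negative mask, which Pre_ excludes.
def intToBitsAuxA (mask i : Int) (bits : List Int) : List Int :=
  if _h : mask ≤ 0 then bits
  else intToBitsAuxA (mask / 2) (i + 1) (if mask % 2 == 1 then bits ++ [i] else bits)
termination_by mask.toNat
decreasing_by omega

def int_to_flipped_bits_py (mask : Int) : List Int := intToBitsAuxA mask 0 []

-- ===== PORT B =====
-- hand-ported `bin(n)` (digits after "0b", MSB first); exact for n ≥ 0, i.e. on Pre_.
def pyBinCore (n : Nat) : List Char :=
  if n = 0 then [] else pyBinCore (n / 2) ++ [if n % 2 = 1 then '1' else '0']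

def pyBinDigits (n : Nat) : List Char := if n = 0 then ['0'] else pyBinCore n

-- Source B: [i for i, c in enumerate(bin(mask)[:1:-1]) if c == '1']; the slice [:1:-1] is the
-- reversal of the digit string (exact for mask ≥ 0).
def int_to_flipped_bits_py_alt (mask : Int) : List Int :=
  ((PySem.List.enumerate ((pyBinDigits mask.toNat).reverse)).filter
      (fun p => p.2 == '1')).map (fun p => p.1)

-- ===== PRECONDITION & SPEC =====
-- Pre_ excludes negative masks: there Python A never returns (the while loop keeps mask = -1 forever).
def Pre_int_to_flipped_bits_py (mask : Int) : Prop := 0 ≤ mask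
instance (mask : Int) : Decidable (Pre_int_to_flipped_bits_py mask) := by unfold Pre_int_to_flipped_bits_py; infer_instance
def pvWitness_int_to_flipped_bits_py : Int := (5)

def Spec_int_to_flipped_bits_py (mask : Int) (out : List Int) : Prop := out = int_to_flipped_bits_py_alt mask
instance (mask : Int) (out : List Int) : Decidable (Spec_int_to_flipped_bits_py mask out) := by unfold Spec_int_to_flipped_bits_py; infer_instance

-- ===== CLAIM (what is proved, stated in full; the proofs are below) =====
def Claim_equal_int_to_flipped_bits_py : Prop := ∀ (mask : Int), Dom_int_to_flipped_bits_py mask → Pre_int_to_flipped_bits_py mask → Spec_int_to_flipped_bits_py mask (int_to_flipped_bits_py mask)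

-- ===== LEMMAS AND PROOFS =====

-- the "indices of '1' chars" extractor that B's filter/map pipeline computes
def pvOnes (l : List Char) (s : Int) : List Int :=
  ((PySem.List.enumerate l s).filter (fun p => p.2 == '1')).map (fun p => p.1)

theorem pvOnes_nil (s : Int) : pvOnes [] s = [] := rfl

theorem pvOnes_cons (c : Char) (l : List Char) (s : Int) :
    pvOnes (c :: l) s = (if c == '1' then [s] else []) ++ pvOnes l (s + 1) := by
  simp only [pvOnes, PySem.List.enumerate_cons, List.filter_cons]
  by_cases h : c == '1' <;> simp [h]

theorem pyBinCore_reverse (n : Nat) :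
    (pyBinCore n).reverse =
      if n = 0 then [] else (if n % 2 = 1 then '1' else '0') :: (pyBinCore (n / 2)).reverse := by
  rw [pyBinCore]
  by_cases h : n = 0 <;> simp [h]

theorem auxA_eq_ones (n : Nat) : ∀ (i : Int) (bits : List Int),
    intToBitsAuxA (n : Int) i bits = bits ++ pvOnes (pyBinCore n).reverse i := by
  induction n using Nat.strong_induction_on with
  | _ n ih =>
    intro i bits
    by_cases h : n = 0
    · subst h
      rw [intToBitsAuxA]
      simp [pyBinCore, pvOnes_nil]
    · rw [intToBitsAuxA]
      have hpos : ¬ ((n : Int) ≤ 0) := by omega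
      have hdiv : (n : Int) / 2 = ((n / 2 : Nat) : Int) := by omega
      have hmod : (n : Int) % 2 = ((n % 2 : Nat) : Int) := by omega
      rw [dif_neg hpos, hdiv, ih (n / 2) (by omega)]
      rw [pyBinCore_reverse n, if_neg h, pvOnes_cons]
      by_cases hm : n % 2 = 1
      · have : ((n : Int) % 2 == 1) = true := by rw [hmod, hm]; rfl
        simp [this, hm]
      · have : ((n : Int) % 2 == 1) = false := by
          rw [hmod]; simp; omega
        simp [this, hm]

-- ===== VERDICT (by name: the statement is the Claim_ definition above) =====
theorem int_to_flipped_bits_py_spec : Claim_equal_int_to_flipped_bits_py := by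
  intro mask _dom pre
  unfold Spec_int_to_flipped_bits_py int_to_flipped_bits_py int_to_flipped_bits_py_alt
  obtain ⟨n, rfl⟩ : ∃ n : Nat, mask = (n : Int) := ⟨mask.toNat, (Int.toNat_of_nonneg pre).symm⟩
  rw [Int.toNat_natCast, auxA_eq_ones n 0 []]
  by_cases h : n = 0
  · subst h
    simp [pyBinDigits, pyBinCore, pvOnes]
  · rw [pyBinDigits, if_neg h]
    rfl
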